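-- pv_equiv track=rewrite | github.com/br-kim/Programmers-Algorithm-Practice | python/Level3/외벽 점검.py | make_weaks
-- ===== SOURCE A (Python) =====
-- def make_weaks(n, weak):
--     weaks = [weak]
--     w = []
--     for i in range(1, len(weak)):
--         w = weak[:]
--         for idx in range(i):
--             w[idx] += n
--         weaks.append(sorted(w))
--     return weaks
-- ===== SOURCE B (Python) =====
-- def _hipos(s, x, lo, hi):
--     # first index in [lo, hi) with x < s[idx] (insertion point after equals)
--     if lo >= hi:
--         return lo
--     mid = (lo + hi) // 2
--     if s[mid] <= x:
--         return _hipos(s, x, mid + 1, hi)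
--     return _hipos(s, x, lo, mid)
--
-- def _lopos(s, x, lo, hi):
--     # first index in [lo, hi) with x <= s[idx]
--     if lo >= hi:
--         return lo
--     mid = (lo + hi) // 2
--     if s[mid] < x:
--         return _lopos(s, x, mid + 1, hi)
--     return _lopos(s, x, lo, mid)
--
-- def _insert(s, x):
--     j = _hipos(s, x, 0, len(s))
--     return s[:j] + [x] + s[j:]
--
-- def _remove(s, x):
--     j = _lopos(s, x, 0, len(s))
--     return s[:j] + s[j + 1:]
--
-- def make_weaks(n, weak):
--     res = [weak]
--     cur = []
--     for x in weak:
--         cur = _insert(cur, x)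
--     for i in range(1, len(weak)):
--         cur = _remove(cur, weak[i - 1])
--         cur = _insert(cur, weak[i - 1] + n)
--         res.append(cur)
--     return res
-- ===== Notes on version B (the rewrite author's own statement) =====
-- stated objective: faster
-- what changed: Instead of copying, shifting a prefix and fully re-sorting for every i, B keeps one sorted working list and derives each row from the previous one by a binary-search removal of weak[i-1] and a binary-search insertion of weak[i-1]+n.
import Mathlib
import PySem

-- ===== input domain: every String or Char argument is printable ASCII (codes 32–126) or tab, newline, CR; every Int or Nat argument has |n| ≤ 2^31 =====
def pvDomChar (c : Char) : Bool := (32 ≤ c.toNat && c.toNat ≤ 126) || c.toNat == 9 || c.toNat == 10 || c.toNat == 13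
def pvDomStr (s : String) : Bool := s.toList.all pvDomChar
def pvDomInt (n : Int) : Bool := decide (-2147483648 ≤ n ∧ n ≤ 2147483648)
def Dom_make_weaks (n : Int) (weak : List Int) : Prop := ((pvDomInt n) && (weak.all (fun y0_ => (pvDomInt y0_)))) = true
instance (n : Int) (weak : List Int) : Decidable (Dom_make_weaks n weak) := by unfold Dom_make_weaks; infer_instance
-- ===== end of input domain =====

-- B replaces A's per-row copy+shift+full-sort by one sorted working list updated per row with a
-- binary-search remove and insert (measured faster in a timing run); return values are identical.

-- ===== PORT A =====
def make_weaks (n : Int) (weak : List Int) : List (List Int) :=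
  let weaks : List (List Int) := [weak]
  (PySem.List.pyRange 1 (weak.length : Int) 1).foldl
    (fun weaks i =>
      let w := weak
      let w := (PySem.List.pyRange 0 i 1).foldl
        (fun w idx => PySem.List.pySetD w idx (PySem.List.pyGetD w idx 0 + n)) w
      weaks ++ [PySem.List.sorted w (fun x => x) false]) weaks

-- ===== PORT B =====
-- _hipos: first index in [lo, hi) with x < s[idx] (insertion point after equals)
def bHipos (s : List Int) (x lo hi : Int) : Int :=
  if h : lo ≥ hi then lo
  else
    let mid := PySem.Int.floordiv (lo + hi) 2
    if PySem.List.pyGetD s mid 0 ≤ x then bHipos s x (mid + 1) hi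
    else bHipos s x lo mid
termination_by (hi - lo).toNat
decreasing_by
  · have _h1 := PySem.Int.floordiv_two_mid_bounds (lo := lo) (hi := hi) (by omega)
    omega
  · have _h1 := PySem.Int.floordiv_two_mid_bounds (lo := lo) (hi := hi) (by omega)
    have _h2 : PySem.Int.floordiv (lo + hi) 2 < hi :=
      (PySem.Int.floordiv_lt_iff_lt_mul (by omega)).2 (by omega)
    omega

-- _lopos: first index in [lo, hi) with x ≤ s[idx]
def bLopos (s : List Int) (x lo hi : Int) : Int :=
  if h : lo ≥ hi then lo
  else
    let mid := PySem.Int.floordiv (lo + hi) 2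
    if PySem.List.pyGetD s mid 0 < x then bLopos s x (mid + 1) hi
    else bLopos s x lo mid
termination_by (hi - lo).toNat
decreasing_by
  · have _h1 := PySem.Int.floordiv_two_mid_bounds (lo := lo) (hi := hi) (by omega)
    omega
  · have _h1 := PySem.Int.floordiv_two_mid_bounds (lo := lo) (hi := hi) (by omega)
    have _h2 : PySem.Int.floordiv (lo + hi) 2 < hi :=
      (PySem.Int.floordiv_lt_iff_lt_mul (by omega)).2 (by omega)
    omega

-- _insert: s[:j] + [x] + s[j:]
def bInsert (s : List Int) (x : Int) : List Int :=
  let j := bHipos s x 0 (s.length : Int)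
  PySem.List.slice s none (some j) ++ [x] ++ PySem.List.slice s (some j) none

-- _remove: s[:j] + s[j+1:]  (exact whenever x ∈ s; make_weaks only removes present values,
-- where Python returns normally)
def bRemove (s : List Int) (x : Int) : List Int :=
  let j := bLopos s x 0 (s.length : Int)
  PySem.List.slice s none (some j) ++ PySem.List.slice s (some (j + 1)) none

-- the second loop of B: one row per element of weak[:-1], by remove + insert on cur
def bRows (n : Int) (cur : List Int) (xs : List Int) : List (List Int) :=
  match xs with
  | [] => []
  | x :: t =>
    let cur' := bInsert (bRemove cur x) (x + n)
    cur' :: bRows n cur' t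

def make_weaks_alt (n : Int) (weak : List Int) : List (List Int) :=
  let cur := weak.foldl bInsert []
  weak :: bRows n cur (PySem.List.slice weak none (some (-1)))

-- ===== PRECONDITION & SPEC =====
def Spec_make_weaks (n : Int) (weak : List Int) (out : List (List Int)) : Prop := out = make_weaks_alt n weak
instance (n : Int) (weak : List Int) (out : List (List Int)) : Decidable (Spec_make_weaks n weak out) := by unfold Spec_make_weaks; infer_instance

-- ===== CLAIM (what is proved, stated in full; the proofs are below) =====
def Claim_equal_make_weaks : Prop := ∀ (n : Int) (weak : List Int), Dom_make_weaks n weak → Spec_make_weaks n weak (make_weaks n weak)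

-- ===== LEMMAS AND PROOFS =====

-- index m (an in-range Int) of s, through pyGetD
theorem pyGetD_int (s : List Int) (m : Int) (h0 : 0 ≤ m) (hm : m.toNat < s.length) :
    PySem.List.pyGetD s m 0 = s[m.toNat] := by
  rw [PySem.List.pyGetD_of_nonneg s 0 h0, List.getD_eq_getElem?_getD,
    List.getElem?_eq_getElem hm]
  rfl

theorem sorted_getElem_mono (s : List Int) (hs : s.Pairwise (· ≤ ·)) (i j : Nat)
    (hij : i ≤ j) (hj : j < s.length) : s[i]'(lt_of_le_of_lt hij hj) ≤ s[j] := by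
  rcases Nat.lt_or_eq_of_le hij with h | h
  · exact List.pairwise_iff_getElem.1 hs i j _ hj h
  · subst h; exact le_refl _

theorem bHipos_spec (s : List Int) (x : Int) (hs : s.Pairwise (· ≤ ·)) (lo hi : Int) :
    0 ≤ lo → lo ≤ hi → hi ≤ (s.length : Int) →
    (∀ (i : Nat) (h : i < s.length), (i : Int) < lo → s[i] ≤ x) →
    (∀ (i : Nat) (h : i < s.length), hi ≤ (i : Int) → x < s[i]) →
    lo ≤ bHipos s x lo hi ∧ bHipos s x lo hi ≤ hi ∧
    (∀ (i : Nat) (h : i < s.length), (i : Int) < bHipos s x lo hi → s[i] ≤ x) ∧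
    (∀ (i : Nat) (h : i < s.length), bHipos s x lo hi ≤ (i : Int) → x < s[i]) := by
  fun_induction bHipos s x lo hi with
  | case1 lo hi h =>
    intro h0 hlh _ H1 H2
    exact ⟨le_refl _, hlh, H1, fun i hi hle => H2 i hi (le_trans (by omega) hle)⟩
  | case2 lo hi h mid hle ih =>
    intro h0 hlh hhl H1 H2
    have hmid := PySem.Int.floordiv_two_mid_bounds (lo := lo) (hi := hi) (by omega)
    have hmhi : mid < hi := (PySem.Int.floordiv_lt_iff_lt_mul (by omega)).2 (by omega)
    have hmn : mid.toNat < s.length := by omega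
    have hsm : s[mid.toNat] ≤ x := by
      rw [← pyGetD_int s mid (by omega) hmn]; exact hle
    refine (ih (by omega) (by omega) hhl ?_ H2).imp (by omega) (fun h => h)
    intro i hilen hi1
    by_cases hc : (i : Int) < lo
    · exact H1 i hilen hc
    · exact le_trans (sorted_getElem_mono s hs i mid.toNat (by omega) hmn) hsm
  | case3 lo hi h mid hle ih =>
    intro h0 hlh hhl H1 H2
    have hmid := PySem.Int.floordiv_two_mid_bounds (lo := lo) (hi := hi) (by omega)
    have hmhi : mid < hi := (PySem.Int.floordiv_lt_iff_lt_mul (by omega)).2 (by omega)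
    have hmn : mid.toNat < s.length := by omega
    have hsm : x < s[mid.toNat] := by
      rw [← pyGetD_int s mid (by omega) hmn]; omega
    refine (ih h0 (by omega) (by omega) H1 ?_).imp (fun h => h) (fun h => h.imp (by omega) (fun h => h))
    intro i hilen hi1
    by_cases hc : hi ≤ (i : Int)
    · exact H2 i hilen hc
    · exact lt_of_lt_of_le hsm (sorted_getElem_mono s hs mid.toNat i (by omega) hilen)

theorem bLopos_spec (s : List Int) (x : Int) (hs : s.Pairwise (· ≤ ·)) (lo hi : Int) :
    0 ≤ lo → lo ≤ hi → hi ≤ (s.length : Int) →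
    (∀ (i : Nat) (h : i < s.length), (i : Int) < lo → s[i] < x) →
    (∀ (i : Nat) (h : i < s.length), hi ≤ (i : Int) → x ≤ s[i]) →
    lo ≤ bLopos s x lo hi ∧ bLopos s x lo hi ≤ hi ∧
    (∀ (i : Nat) (h : i < s.length), (i : Int) < bLopos s x lo hi → s[i] < x) ∧
    (∀ (i : Nat) (h : i < s.length), bLopos s x lo hi ≤ (i : Int) → x ≤ s[i]) := by
  fun_induction bLopos s x lo hi with
  | case1 lo hi h =>
    intro h0 hlh _ H1 H2
    exact ⟨le_refl _, hlh, H1, fun i hi hle => H2 i hi (le_trans (by omega) hle)⟩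
  | case2 lo hi h mid hle ih =>
    intro h0 hlh hhl H1 H2
    have hmid := PySem.Int.floordiv_two_mid_bounds (lo := lo) (hi := hi) (by omega)
    have hmhi : mid < hi := (PySem.Int.floordiv_lt_iff_lt_mul (by omega)).2 (by omega)
    have hmn : mid.toNat < s.length := by
      omega
    have hsm : s[mid.toNat] < x := by
      rw [← pyGetD_int s mid (by omega) hmn]; exact hle
    refine (ih (by omega) (by omega) hhl ?_ H2).imp (by omega) (fun h => h)
    intro i hilen hi1
    by_cases hc : (i : Int) < lo
    · exact H1 i hilen hc
    · exact lt_of_le_of_lt (sorted_getElem_mono s hs i mid.toNat (by omega) hmn) hsm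
  | case3 lo hi h mid hle ih =>
    intro h0 hlh hhl H1 H2
    have hmid := PySem.Int.floordiv_two_mid_bounds (lo := lo) (hi := hi) (by omega)
    have hmhi : mid < hi := (PySem.Int.floordiv_lt_iff_lt_mul (by omega)).2 (by omega)
    have hmn : mid.toNat < s.length := by omega
    have hsm : x ≤ s[mid.toNat] := by
      rw [← pyGetD_int s mid (by omega) hmn]; omega
    refine (ih h0 (by omega) (by omega) H1 ?_).imp (fun h => h) (fun h => h.imp (by omega) (fun h => h))
    intro i hilen hi1
    by_cases hc : hi ≤ (i : Int)
    · exact H2 i hilen hc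
    · exact le_trans hsm (sorted_getElem_mono s hs mid.toNat i (by omega) hilen)

theorem bHipos_bounds (s : List Int) (x : Int) (lo hi : Int) (h : lo ≤ hi) :
    lo ≤ bHipos s x lo hi ∧ bHipos s x lo hi ≤ hi := by
  fun_induction bHipos s x lo hi with
  | case1 lo hi h' => omega
  | case2 lo hi h' mid hle ih =>
    have hmm : mid = PySem.Int.floordiv (lo + hi) 2 := rfl
    have hmid := PySem.Int.floordiv_two_mid_bounds (lo := lo) (hi := hi) (by omega)
    have hmhi : mid < hi := hmm ▸ (PySem.Int.floordiv_lt_iff_lt_mul (by omega)).2 (by omega)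
    have := ih (by omega)
    omega
  | case3 lo hi h' mid hle ih =>
    have hmm : mid = PySem.Int.floordiv (lo + hi) 2 := rfl
    have hmid := PySem.Int.floordiv_two_mid_bounds (lo := lo) (hi := hi) (by omega)
    have hmhi : mid < hi := hmm ▸ (PySem.Int.floordiv_lt_iff_lt_mul (by omega)).2 (by omega)
    have := ih (by omega)
    omega

theorem bLopos_bounds (s : List Int) (x : Int) (lo hi : Int) (h : lo ≤ hi) :
    lo ≤ bLopos s x lo hi ∧ bLopos s x lo hi ≤ hi := by
  fun_induction bLopos s x lo hi with
  | case1 lo hi h' => omega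
  | case2 lo hi h' mid hle ih =>
    have hmm : mid = PySem.Int.floordiv (lo + hi) 2 := rfl
    have hmid := PySem.Int.floordiv_two_mid_bounds (lo := lo) (hi := hi) (by omega)
    have hmhi : mid < hi := hmm ▸ (PySem.Int.floordiv_lt_iff_lt_mul (by omega)).2 (by omega)
    have := ih (by omega)
    omega
  | case3 lo hi h' mid hle ih =>
    have hmm : mid = PySem.Int.floordiv (lo + hi) 2 := rfl
    have hmid := PySem.Int.floordiv_two_mid_bounds (lo := lo) (hi := hi) (by omega)
    have hmhi : mid < hi := hmm ▸ (PySem.Int.floordiv_lt_iff_lt_mul (by omega)).2 (by omega)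
    have := ih (by omega)
    omega

-- bInsert as take/drop around the found position
theorem bInsert_eq (s : List Int) (x : Int) :
    bInsert s x = s.take (bHipos s x 0 (s.length : Int)).toNat
      ++ x :: s.drop (bHipos s x 0 (s.length : Int)).toNat := by
  have hb := bHipos_bounds s x 0 (s.length : Int) (by positivity)
  show PySem.List.slice s none (some (bHipos s x 0 (s.length : Int)))
      ++ [x] ++ PySem.List.slice s (some (bHipos s x 0 (s.length : Int))) = _
  rw [show bHipos s x 0 (s.length : Int)
      = (((bHipos s x 0 (s.length : Int)).toNat : Nat) : Int) by omega]
  rw [PySem.List.slice_to_natCast, PySem.List.slice_from_natCast]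
  simp [Int.toNat_of_nonneg hb.1]

theorem bInsert_perm (s : List Int) (x : Int) : (bInsert s x).Perm (x :: s) := by
  rw [bInsert_eq]
  have := List.perm_middle (l₁ := s.take (bHipos s x 0 (s.length : Int)).toNat) (a := x)
    (l₂ := s.drop (bHipos s x 0 (s.length : Int)).toNat)
  rw [List.take_append_drop] at this
  exact this

theorem bInsert_pairwise (s : List Int) (x : Int) (hs : s.Pairwise (· ≤ ·)) :
    (bInsert s x).Pairwise (· ≤ ·) := by
  rcases bHipos_spec s x hs 0 (s.length : Int) (le_refl _) (by positivity) (le_refl _)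
    (fun i h hlt => absurd hlt (by omega)) (fun i h hle => absurd hle (by omega))
    with ⟨h0, hlen, Hle, Hgt⟩
  rw [bInsert_eq]
  set j := bHipos s x 0 (s.length : Int) with hj
  have hmem_take : ∀ a ∈ s.take j.toNat, a ≤ x := by
    intro a ha
    rcases List.mem_iff_getElem.1 ha with ⟨i, hilt, rfl⟩
    have hi' : i < s.length := lt_of_lt_of_le hilt (by simp)
    rw [List.getElem_take]
    exact Hle i hi' (by simp at hilt; omega)
  have hmem_drop : ∀ b ∈ s.drop j.toNat, x < b := by
    intro b hb
    rcases List.mem_iff_getElem.1 hb with ⟨i, hilt, rfl⟩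
    have hi' : j.toNat + i < s.length := by simp at hilt; omega
    rw [List.getElem_drop]
    exact Hgt (j.toNat + i) hi' (by omega)
  refine List.pairwise_append.2 ⟨List.Pairwise.sublist (List.take_sublist _ _) hs, ?_, ?_⟩
  · refine List.pairwise_cons.2 ⟨fun b hb => le_of_lt (hmem_drop b hb),
      List.Pairwise.sublist (List.drop_sublist _ _) hs⟩
  · intro a ha b hb
    rcases List.mem_cons.1 hb with rfl | hb
    · exact hmem_take a ha
    · exact le_of_lt (lt_of_le_of_lt (hmem_take a ha) (hmem_drop b hb))

theorem bRemove_eq (s : List Int) (x : Int) :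
    bRemove s x = s.take (bLopos s x 0 (s.length : Int)).toNat
      ++ s.drop ((bLopos s x 0 (s.length : Int)).toNat + 1) := by
  have hb := bLopos_bounds s x 0 (s.length : Int) (by positivity)
  show PySem.List.slice s none (some (bLopos s x 0 (s.length : Int)))
      ++ PySem.List.slice s (some (bLopos s x 0 (s.length : Int) + 1)) = _
  rw [show bLopos s x 0 (s.length : Int)
      = (((bLopos s x 0 (s.length : Int)).toNat : Nat) : Int) by omega]
  rw [show (((bLopos s x 0 (s.length : Int)).toNat : Nat) : Int) + 1
      = (((bLopos s x 0 (s.length : Int)).toNat + 1 : Nat) : Int) by push_cast; ring]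
  rw [PySem.List.slice_to_natCast, PySem.List.slice_from_natCast]
  simp [Int.toNat_of_nonneg hb.1]

theorem bRemove_pairwise (s : List Int) (x : Int) (hs : s.Pairwise (· ≤ ·)) :
    (bRemove s x).Pairwise (· ≤ ·) := by
  rw [bRemove_eq]
  refine List.Pairwise.sublist ?_ hs
  have h1 : (s.drop ((bLopos s x 0 (s.length : Int)).toNat + 1)).Sublist
      (s.drop (bLopos s x 0 (s.length : Int)).toNat) := by
    rw [← List.drop_drop, List.drop_one]
    exact List.tail_sublist _
  have h2 := h1.append_left (s.take (bLopos s x 0 (s.length : Int)).toNat)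
  rw [List.take_append_drop] at h2
  exact h2

theorem bRemove_perm (s : List Int) (x : Int) (hs : s.Pairwise (· ≤ ·)) (hx : x ∈ s) :
    (x :: bRemove s x).Perm s := by
  rcases bLopos_spec s x hs 0 (s.length : Int) (le_refl _) (by positivity) (le_refl _)
    (fun i h hlt => absurd hlt (by omega)) (fun i h hle => absurd hle (by omega))
    with ⟨h0, hlen, Hlt, Hge⟩
  set j := bLopos s x 0 (s.length : Int) with hj
  rcases List.mem_iff_getElem.1 hx with ⟨i0, hi0, hxi0⟩
  have hji0 : j ≤ (i0 : Int) := by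
    by_contra hcon
    have := Hlt i0 hi0 (by omega)
    omega
  have hjlen : j.toNat < s.length := by omega
  have hjx : s[j.toNat] = x := by
    have hle1 := Hge j.toNat hjlen (by omega)
    have hle2 : s[j.toNat] ≤ s[i0] := sorted_getElem_mono s hs j.toNat i0 (by omega) hi0
    omega
  rw [bRemove_eq, ← hj]
  have hsplit := List.take_append_drop j.toNat s
  rw [List.drop_eq_getElem_cons hjlen, hjx] at hsplit
  have hpm : (x :: (s.take j.toNat ++ s.drop (j.toNat + 1))).Perm
      (s.take j.toNat ++ x :: s.drop (j.toNat + 1)) := List.perm_middle.symm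
  rw [hsplit] at hpm
  exact hpm

theorem foldl_bInsert (xs : List Int) : ∀ (acc : List Int), acc.Pairwise (· ≤ ·) →
    (xs.foldl bInsert acc).Pairwise (· ≤ ·) ∧ (xs.foldl bInsert acc).Perm (acc ++ xs) := by
  induction xs with
  | nil => intro acc h; simpa using h
  | cons x t ih =>
    intro acc h
    rcases ih (bInsert acc x) (bInsert_pairwise acc x h) with ⟨hp, he⟩
    exact ⟨hp, he.trans (((bInsert_perm acc x).append_right t).trans List.perm_middle.symm)⟩

-- the common description of the rows both programs produce (proof-side only)
def rowsSpec (n : Int) : List Int → List Int → List (List Int)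
  | pre, x :: y :: t =>
    PySem.List.sorted ((pre ++ [x + n]) ++ y :: t) (fun v => v) false
      :: rowsSpec n (pre ++ [x + n]) (y :: t)
  | _, _ => []

theorem bRows_eq (n : Int) (t : List Int) : ∀ (cur pre0 : List Int), cur.Pairwise (· ≤ ·) →
    cur.Perm (pre0 ++ t) → bRows n cur t.dropLast = rowsSpec n pre0 t := by
  induction t with
  | nil => intro cur pre0 _ _; simp [bRows, rowsSpec]
  | cons x t ih =>
    cases t with
    | nil => intro cur pre0 _ _; simp [bRows, rowsSpec]
    | cons y t' =>
      intro cur pre0 hpw hperm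
      have hx : x ∈ cur := hperm.mem_iff.2 (by simp)
      have hrm : (x :: bRemove cur x).Perm (pre0 ++ x :: y :: t') :=
        (bRemove_perm cur x hpw hx).trans hperm
      have hrm' : (bRemove cur x).Perm (pre0 ++ y :: t') :=
        (hrm.trans List.perm_middle).cons_inv
      have hstep : ((pre0 ++ [x + n]) ++ y :: t').Perm ((x + n) :: (pre0 ++ y :: t')) := by
        rw [List.append_assoc, List.singleton_append]
        exact List.perm_middle
      have hcur' : (bInsert (bRemove cur x) (x + n)).Perm ((pre0 ++ [x + n]) ++ y :: t') :=
        (bInsert_perm _ (x + n)).trans ((hrm'.cons (x + n)).trans hstep.symm)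
      have hcpw : (bInsert (bRemove cur x) (x + n)).Pairwise (· ≤ ·) :=
        bInsert_pairwise _ _ (bRemove_pairwise cur x hpw)
      show bRows n cur (x :: (y :: t').dropLast) = rowsSpec n pre0 (x :: y :: t')
      simp only [bRows, rowsSpec]
      refine congrArg₂ List.cons ?_ (ih _ _ hcpw hcur')
      exact PySem.List.eq_of_perm_of_pairwise_le_of_injective (fun v => v) (fun a b h => h)
        (hcur'.trans (PySem.List.sorted_perm _ _ _).symm) hcpw (PySem.List.sorted_pairwise _ _)

-- A's inner loop: adding n to the first m cells is map (+n) on the prefix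
theorem inner_eq (n : Int) (weak : List Int) (m : Nat) (hm : m ≤ weak.length) :
    (PySem.List.pyRange 0 (m : Int) 1).foldl
      (fun w idx => PySem.List.pySetD w idx (PySem.List.pyGetD w idx 0 + n)) weak
    = (weak.take m).map (· + n) ++ weak.drop m := by
  induction m with
  | zero => simp [PySem.List.pyRange_one_eq_nil]
  | succ m ih =>
    have hm' : m ≤ weak.length := Nat.le_of_succ_le hm
    have hlt : m < weak.length := hm
    rw [show ((m + 1 : Nat) : Int) = (m : Int) + 1 by push_cast; ring,
      PySem.List.pyRange_one_succ_right (by positivity), List.foldl_append, ih hm']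
    have hlen : ((weak.take m).map (· + n)).length = m := by
      simp [List.length_take, Nat.min_eq_left hm']
    have hgd : PySem.List.pyGetD ((weak.take m).map (· + n) ++ weak.drop m) ((m : Nat) : Int) 0
        = weak[m] := by
      rw [PySem.List.pyGetD_natCast]
      rw [List.drop_eq_getElem_cons hlt, List.getD_eq_getElem?_getD]
      rw [List.getElem?_append_right (by omega)]
      simp [Nat.min_eq_left hm', List.getElem?_eq_getElem hlt]
    simp only [List.foldl_cons, List.foldl_nil, hgd, PySem.List.pySetD_natCast]
    rw [List.drop_eq_getElem_cons hlt, List.set_append_right m _ (by omega), hlen,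
      Nat.sub_self, List.set_cons_zero, List.take_succ_eq_append_getElem hlt]
    simp [List.take_succ_eq_append_getElem (show m < (weak.map (· + n)).length by simpa using hlt)]

-- the rows A computes, as rowsSpec
theorem rowsSpec_eq (n : Int) (t : List Int) : ∀ (p : List Int),
    (List.range (t.length - 1)).map (fun k =>
      PySem.List.sorted (((p ++ t).take (p.length + k + 1)).map (· + n)
        ++ (p ++ t).drop (p.length + k + 1)) (fun v => v) false)
    = rowsSpec n (p.map (· + n)) t := by
  induction t with
  | nil => intro p; simp [rowsSpec]
  | cons x t ih =>
    cases t with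
    | nil => intro p; simp [rowsSpec]
    | cons y t' =>
      intro p
      have hlen : (x :: y :: t').length - 1 = t'.length + 1 := by simp
      rw [hlen, List.range_succ_eq_map, List.map_cons, List.map_map]
      refine congrArg₂ List.cons ?_ ?_
      · have h1 : (p ++ x :: y :: t').take (p.length + 0 + 1) = p ++ [x] := by
          rw [show p.length + 0 + 1 = p.length + 1 by ring]
          simpa using List.take_length_add_append (l₁ := p) (l₂ := x :: y :: t') 1
        have h2 : (p ++ x :: y :: t').drop (p.length + 0 + 1) = y :: t' := by
          rw [show p.length + 0 + 1 = p.length + 1 by ring]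
          simp
        rw [h1, h2]
        simp
      · have := ih (p ++ [x])
        rw [show ((y :: t').length - 1) = t'.length by simp] at this
        rw [show (p ++ [x]).map (· + n) = p.map (· + n) ++ [x + n] by simp] at this
        simp only [List.length_append, List.length_cons, List.length_nil, List.append_assoc,
          List.singleton_append] at this
        rw [← this]
        refine List.map_congr_left ?_
        intro k _
        simp only [Function.comp_apply, Nat.succ_eq_add_one]
        rw [show p.length + 1 + k + 1 = p.length + (k + 1) + 1 by ring]

-- ===== VERDICT (by name: the statement is the Claim_ definition above) =====
theorem make_weaks_spec : Claim_equal_make_weaks := by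
  intro n weak _
  show make_weaks n weak = make_weaks_alt n weak
  have hB : make_weaks_alt n weak = weak :: rowsSpec n [] weak := by
    simp only [make_weaks_alt, PySem.List.slice_to_neg_one]
    rcases foldl_bInsert weak [] List.Pairwise.nil with ⟨hp, he⟩
    exact congrArg (weak :: ·) (bRows_eq n weak _ [] hp (by simpa using he))
  have hA : make_weaks n weak = weak :: rowsSpec n [] weak := by
    simp only [make_weaks]
    rw [PySem.List.foldl_append_singleton_eq_map]
    rw [PySem.List.pyRange_one, List.map_map]
    rw [show ((weak.length : Int) - 1).toNat = weak.length - 1 by omega]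
    have hmap : ∀ k ∈ List.range (weak.length - 1),
        ((fun i => PySem.List.sorted ((PySem.List.pyRange 0 i).foldl
            (fun w idx => PySem.List.pySetD w idx (PySem.List.pyGetD w idx 0 + n)) weak)
            (fun x => x) false) ∘ (fun k : Nat => (1 : Int) + k)) k
        = PySem.List.sorted ((weak.take (k + 1)).map (· + n) ++ weak.drop (k + 1))
            (fun x => x) false := by
      intro k hk
      have hk' : k + 1 ≤ weak.length := by
        have := List.mem_range.1 hk; omega
      simp only [Function.comp_apply]
      rw [show (1 : Int) + (k : Int) = ((k + 1 : Nat) : Int) by push_cast; ring]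
      rw [inner_eq n weak (k + 1) hk']
    rw [List.map_congr_left hmap]
    have := rowsSpec_eq n weak []
    simpa using this
  rw [hA, hB]
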